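-- pv_equiv track=rewrite | github.com/nick-carroll1/Markov-Text-Generator | Markov Text Generator.py | buildCount
-- ===== SOURCE A (Python) =====
-- def buildCount(sentence, n, corpus):
--     count = {}
--     for eachToken in range(len(corpus)):
--         if corpus[eachToken - n + 1 : eachToken] == sentence[-n + 1 :]:
--             if corpus[eachToken] not in count:
--                 count[corpus[eachToken]] = 1
--                 pass
--             else:
--                 count[corpus[eachToken]] += 1
--                 pass
--             pass
--         pass
--     return count
-- ===== SOURCE B (Python) =====
-- def buildCount(sentence, n, corpus):
--     # Classic Markov indexing: one pass groups every token under its own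
--     # preceding-context key; the answer is a single lookup of the sentence
--     # context in that index (no per-position comparison against the pattern).
--     index = {}
--     for i in range(len(corpus)):
--         ctx = tuple(corpus[i - n + 1 : i])
--         bucket = index.get(ctx, {})
--         bucket[corpus[i]] = bucket.get(corpus[i], 0) + 1
--         index[ctx] = bucket
--     return index.get(tuple(sentence[-n + 1 :]), {})
-- ===== Notes on version B (the rewrite author's own statement) =====
-- stated objective: alternative
-- what changed: B replaces A's per-position comparison of each context slice against the sentence suffix by the classic Markov indexing: one pass groups every token under its own preceding-context key in a nested dict, and the answer is a single hash lookup of the sentence context in that index.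
import Mathlib
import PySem

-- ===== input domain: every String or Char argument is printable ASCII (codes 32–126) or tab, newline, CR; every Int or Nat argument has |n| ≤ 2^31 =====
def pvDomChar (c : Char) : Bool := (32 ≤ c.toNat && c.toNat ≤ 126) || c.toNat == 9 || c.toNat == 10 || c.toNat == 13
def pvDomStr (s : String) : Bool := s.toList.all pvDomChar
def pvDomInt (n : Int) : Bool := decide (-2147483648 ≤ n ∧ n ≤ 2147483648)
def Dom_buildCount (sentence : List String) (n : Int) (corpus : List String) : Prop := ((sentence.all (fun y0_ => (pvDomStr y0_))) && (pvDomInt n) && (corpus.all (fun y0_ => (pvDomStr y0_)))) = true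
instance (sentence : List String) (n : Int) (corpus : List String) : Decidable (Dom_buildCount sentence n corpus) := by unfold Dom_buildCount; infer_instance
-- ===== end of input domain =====

-- B builds a full context→(token→count) index in one pass and answers with a single
-- lookup of the sentence context, instead of A's per-position comparison against it.

-- ===== PORT A =====
def buildCount (sentence : List String) (n : Int) (corpus : List String) : List (String × Int) :=
  let count : PySem.Dict String Int :=
    (PySem.List.pyRange 0 (corpus.length : Int) 1).foldl
      (fun d eachToken =>
        if PySem.List.slice corpus (some (eachToken - n + 1)) (some eachToken)
             == PySem.List.slice sentence (some (-n + 1)) none then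
          let tok := PySem.List.pyGetD corpus eachToken ""
          if !d.contains tok then d.insert tok 1
          else d.insert tok (d.getD tok 0 + 1)
        else d)
      PySem.Dict.empty
  count.items

-- ===== PORT B =====
-- `bucket = index.get(ctx, {}); bucket[tok] = bucket.get(tok, 0) + 1; index[ctx] = bucket`
-- is ported as one insert of the updated bucket (Dict.insert overwrites in place).
def buildCount_alt (sentence : List String) (n : Int) (corpus : List String) : List (String × Int) :=
  let index : PySem.Dict (List String) (PySem.Dict String Int) :=
    (PySem.List.pyRange 0 (corpus.length : Int) 1).foldl
      (fun d i =>
        let ctx := PySem.List.slice corpus (some (i - n + 1)) (some i)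
        let tok := PySem.List.pyGetD corpus i ""
        let bucket := d.getD ctx PySem.Dict.empty
        d.insert ctx (bucket.insert tok (bucket.getD tok 0 + 1)))
      PySem.Dict.empty
  (index.getD (PySem.List.slice sentence (some (-n + 1)) none) PySem.Dict.empty).items

-- ===== PRECONDITION & SPEC =====
def Spec_buildCount (sentence : List String) (n : Int) (corpus : List String) (out : List (String × Int)) : Prop := out = buildCount_alt sentence n corpus
instance (sentence : List String) (n : Int) (corpus : List String) (out : List (String × Int)) : Decidable (Spec_buildCount sentence n corpus out) := by unfold Spec_buildCount; infer_instance

-- ===== CLAIM (what is proved, stated in full; the proofs are below) =====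
def Claim_equal_buildCount : Prop := ∀ (sentence : List String) (n : Int) (corpus : List String), Dom_buildCount sentence n corpus → Spec_buildCount sentence n corpus (buildCount sentence n corpus)

-- ===== LEMMAS AND PROOFS =====

-- A's two dict-update branches are both "insert tok (old count + 1)".
theorem buildCount_body_eq (d : PySem.Dict String Int) (tok : String) :
    (if !d.contains tok then d.insert tok 1 else d.insert tok (d.getD tok 0 + 1))
      = d.insert tok (d.getD tok 0 + 1) := by
  by_cases h : d.contains tok
  · simp [h]
  · simp only [Bool.not_eq_true] at h
    simp [h, PySem.Dict.getD_of_not_contains _ _ h]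

-- The pattern-slot of B's index fold evolves exactly as A's filtered counter fold.
theorem buildCount_index_invariant (n : Int) (corpus : List String) (p : List String)
    (xs : List Int) (d : PySem.Dict (List String) (PySem.Dict String Int)) :
    (xs.foldl
        (fun d i =>
          let ctx := PySem.List.slice corpus (some (i - n + 1)) (some i)
          let tok := PySem.List.pyGetD corpus i ""
          let bucket := d.getD ctx PySem.Dict.empty
          d.insert ctx (bucket.insert tok (bucket.getD tok 0 + 1)))
        d).getD p PySem.Dict.empty
      = xs.foldl
          (fun c i =>
            if PySem.List.slice corpus (some (i - n + 1)) (some i) == p then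
              let tok := PySem.List.pyGetD corpus i ""
              c.insert tok (c.getD tok 0 + 1)
            else c)
          (d.getD p PySem.Dict.empty) := by
  induction xs generalizing d with
  | nil => rfl
  | cons i xs ih =>
    simp only [List.foldl_cons]
    rw [ih]
    by_cases hc : PySem.List.slice corpus (some (i - n + 1)) (some i) = p
    · simp only [hc, BEq.rfl, if_true, PySem.Dict.getD_insert_self]
    · have hbeq : (PySem.List.slice corpus (some (i - n + 1)) (some i) == p) = false := by
        simpa using hc
      simp [hbeq, PySem.Dict.getD_insert, Ne.symm hc]

-- ===== VERDICT (by name: the statement is the Claim_ definition above) =====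
theorem buildCount_spec : Claim_equal_buildCount := by
  intro sentence n corpus _
  unfold Spec_buildCount buildCount buildCount_alt
  dsimp only []
  rw [buildCount_index_invariant]
  simp only [PySem.Dict.getD_empty]
  congr 1
  apply PySem.List.foldl_congr_mem
  intro d i _
  by_cases hc : PySem.List.slice corpus (some (i - n + 1)) (some i)
      = PySem.List.slice sentence (some (-n + 1)) none
  · simp only [hc, BEq.rfl, if_true]
    exact buildCount_body_eq d (PySem.List.pyGetD corpus i "")
  · have hbeq : (PySem.List.slice corpus (some (i - n + 1)) (some i)
        == PySem.List.slice sentence (some (-n + 1)) none) = false := by simpa using hc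
    simp [hbeq]
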